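-- pv_equiv track=rewrite | github.com/IESD/curriculumAnalysis | main/extract.py | fragment
-- ===== SOURCE A (Python) =====
-- def fragment(data, final):
--     result = []
--     while not data[0].startswith(final):
--         row = data.pop(0).strip()
--         if not row:
--             continue
--         result.append(row)
--     return result
-- ===== SOURCE B (Python) =====
-- def fragment(data, final):
--     # two-pass: locate the boundary, then strip-filter the prefix; consume it from data
--     i = next(k for k, line in enumerate(data) if line.startswith(final))
--     result = [s for s in map(str.strip, data[:i]) if s]
--     del data[:i]
--     return result
-- ===== Notes on version B (the rewrite author's own statement) =====
-- stated objective: faster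
-- what changed: Replaces the quadratic pop(0)-one-at-a-time loop with a single enumerate scan that finds the boundary index, a strip-filter pass over the prefix, and one del data[:i] to consume it.
import Mathlib
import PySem

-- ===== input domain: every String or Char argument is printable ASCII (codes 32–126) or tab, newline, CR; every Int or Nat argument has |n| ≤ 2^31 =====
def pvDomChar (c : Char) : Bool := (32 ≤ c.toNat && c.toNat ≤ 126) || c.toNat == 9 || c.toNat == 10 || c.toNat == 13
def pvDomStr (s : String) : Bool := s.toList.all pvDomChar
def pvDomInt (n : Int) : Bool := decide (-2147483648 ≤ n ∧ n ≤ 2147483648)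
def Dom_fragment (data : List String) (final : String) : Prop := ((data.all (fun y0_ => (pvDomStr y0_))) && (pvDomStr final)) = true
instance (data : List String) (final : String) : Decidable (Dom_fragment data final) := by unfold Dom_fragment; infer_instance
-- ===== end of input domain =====

-- B replaces A's quadratic pop(0) loop by a boundary search plus one strip-filter pass (faster per the
-- timing run). A mutates `data` (pops the consumed prefix); the equivalence proved here is about the
-- RETURN value only, though B performs the same consumption via `del data[:i]` on success.

-- ===== PORT A =====
-- A's while loop: result accumulator, pop(0) = head, stop when head startswith final.
def fragGoA (final : String) : List String → List String → List String
  | [], acc => acc          -- Python: data[0] raises IndexError here; excluded by Pre_fragment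
  | x :: rest, acc =>
    if PySem.Str.startswith x final then acc
    else
      let row := PySem.Str.strip x
      if row == "" then fragGoA final rest acc
      else fragGoA final rest (acc ++ [row])

def fragment (data : List String) (final : String) : List String :=
  fragGoA final data []

-- ===== PORT B =====
-- B: find the first index whose line starts with final, then strip-filter the prefix.
def fragment_alt (data : List String) (final : String) : List String :=
  match data.findIdx? (fun line => PySem.Str.startswith line final) with
  | some i => ((data.take i).map PySem.Str.strip).filter (fun s => !(s == ""))
  | none => []              -- Python B: next(...) raises StopIteration here; excluded by Pre_fragment

-- ===== PRECONDITION & SPEC =====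
-- Pre_ excludes exactly the inputs where no line starts with final: there A raises IndexError
-- (after emptying data) and B raises StopIteration.
def Pre_fragment (data : List String) (final : String) : Prop :=
  ∃ s ∈ data, PySem.Str.startswith s final = true
instance (data : List String) (final : String) : Decidable (Pre_fragment data final) := by
  unfold Pre_fragment; infer_instance

def pvWitness_fragment : List String × String := ([" a ", "", "END x", "z"], "END")

def Spec_fragment (data : List String) (final : String) (out : List String) : Prop := out = fragment_alt data final
instance (data : List String) (final : String) (out : List String) : Decidable (Spec_fragment data final out) := by unfold Spec_fragment; infer_instance

-- ===== CLAIM (what is proved, stated in full; the proofs are below) =====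
def Claim_equal_fragment : Prop := ∀ (data : List String) (final : String), Dom_fragment data final → Pre_fragment data final → Spec_fragment data final (fragment data final)

-- ===== LEMMAS AND PROOFS =====

-- B's value on a cons whose head does not match, as a fold step.
theorem alt_cons (x : String) (rest : List String) (final : String)
    (hx : PySem.Str.startswith x final = false)
    (hrest : Pre_fragment rest final) :
    fragment_alt (x :: rest) final =
      (if PySem.Str.strip x == "" then [] else [PySem.Str.strip x]) ++ fragment_alt rest final := by
  unfold fragment_alt
  rw [List.findIdx?_cons, hx]
  cases h : rest.findIdx? (fun line => PySem.Str.startswith line final) with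
  | none =>
      obtain ⟨s, hs, hsf⟩ := hrest
      have := List.findIdx?_eq_none_iff.mp h s hs
      simp at hsf this
      simp [hsf] at this
  | some i =>
      simp only [Option.map_some, List.take_succ_cons, List.map_cons, List.filter_cons]
      cases hb : PySem.Str.strip x == "" <;> simp [hb]

theorem goA_eq (final : String) (data : List String) :
    ∀ acc, Pre_fragment data final →
      fragGoA final data acc = acc ++ fragment_alt data final := by
  induction data with
  | nil => intro acc hpre; exact absurd hpre (by simp [Pre_fragment])
  | cons x rest ih =>
      intro acc hpre
      by_cases hx : PySem.Str.startswith x final = true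
      · simp only [fragGoA, hx, if_true]
        unfold fragment_alt
        rw [List.findIdx?_cons, hx]
        simp
      · have hx' : PySem.Str.startswith x final = false := by
          cases h : PySem.Str.startswith x final <;> simp_all
        have hrest : Pre_fragment rest final := by
          obtain ⟨s, hs, hsf⟩ := hpre
          rcases List.mem_cons.mp hs with rfl | hmem
          · exact (hx hsf).elim
          · exact ⟨s, hmem, hsf⟩
        rw [alt_cons x rest final hx' hrest]
        simp only [fragGoA, hx', Bool.false_eq_true, if_false]
        cases hb : PySem.Str.strip x == "" with
        | true => simpa using ih acc hrest
        | false =>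
            rw [if_neg (by simp [hb]), ih (acc ++ [PySem.Str.strip x]) hrest]
            simp

-- ===== VERDICT (by name: the statement is the Claim_ definition above) =====
theorem fragment_spec : Claim_equal_fragment := by
  intro data final _ hpre
  unfold Spec_fragment fragment
  simpa using goA_eq final data [] hpre
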